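-- pv_equiv track=rewrite | github.com/BOB14th-project/AI--Benchmark | agents/base_agent.py | _generate_json_structure
-- ===== SOURCE A (Python) =====
-- from typing import Dict, Any, List
--
-- def _generate_json_structure(analysis_points: List[str]) -> str:
--     json_fields = []
--     for point in analysis_points:
--         field_name = point.lower().replace(" ", "_").replace("-", "_").replace("(", "_").replace(")", "_").replace("/", "_").replace(",", "_").replace("#", "_").replace(".", "_")
--         # 연속된 언더스코어 제거
--         while "__" in field_name:
--             field_name = field_name.replace("__", "_")
--         field_name = field_name.strip("_")
--         json_fields.append(f'        "{field_name}": "<your analysis for {point}>"')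
--     return ",\n".join(json_fields)
-- ===== SOURCE B (Python) =====
-- def _generate_json_structure(analysis_points):
--     lines = []
--     for point in analysis_points:
--         buf = []
--         for ch in point.lower():
--             c = '_' if ch in ' -()/,#.' else ch
--             if c == '_' and buf and buf[-1] == '_':
--                 continue  # collapse runs of '_' on the fly
--             buf.append(c)
--         field_name = ''.join(buf).strip('_')
--         lines.append(f'        "{field_name}": "<your analysis for {point}>"')
--     return ',\n'.join(lines)
-- ===== Notes on version B (the rewrite author's own statement) =====
-- stated objective: alternative
-- what changed: B replaces A's chain of eight full-string .replace() passes plus the repeated while-loop '__'-collapsing passes by a single character-by-character scan per label that maps delimiters to '_' and suppresses consecutive underscores on the fly.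
import Mathlib
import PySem

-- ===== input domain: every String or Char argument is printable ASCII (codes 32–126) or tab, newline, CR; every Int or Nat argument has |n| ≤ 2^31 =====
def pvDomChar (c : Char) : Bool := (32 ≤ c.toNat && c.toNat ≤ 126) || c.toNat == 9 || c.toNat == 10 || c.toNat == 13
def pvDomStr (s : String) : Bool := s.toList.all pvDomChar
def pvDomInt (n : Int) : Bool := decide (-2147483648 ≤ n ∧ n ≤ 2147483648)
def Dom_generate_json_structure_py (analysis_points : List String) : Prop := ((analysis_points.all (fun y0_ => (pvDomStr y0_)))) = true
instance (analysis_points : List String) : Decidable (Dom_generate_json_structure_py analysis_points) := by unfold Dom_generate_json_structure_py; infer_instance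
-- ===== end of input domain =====

-- B builds each field_name in one linear scan (map the eight delimiter chars to '_', collapse
-- '_'-runs on the fly) instead of A's eight .replace() passes plus the while-loop collapse.


-- ===== PORT A =====
-- while "__" in field_name: field_name = field_name.replace("__", "_")
-- (fuel = the string's length; each executed pass strictly shortens the string, so it suffices)
def pvAWhile : Nat → String → String
  | 0, s => s
  | fuel + 1, s =>
    if PySem.Str.isIn "__" s then pvAWhile fuel (PySem.Str.replace s "__" "_") else s

def pvAField (point : String) : String :=
  let f1 := PySem.Str.replace (PySem.Str.lower point) " " "_"
  let f2 := PySem.Str.replace f1 "-" "_"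
  let f3 := PySem.Str.replace f2 "(" "_"
  let f4 := PySem.Str.replace f3 ")" "_"
  let f5 := PySem.Str.replace f4 "/" "_"
  let f6 := PySem.Str.replace f5 "," "_"
  let f7 := PySem.Str.replace f6 "#" "_"
  let f8 := PySem.Str.replace f7 "." "_"
  let fn := pvAWhile f8.toList.length f8
  PySem.Str.stripChars fn "_"

-- the f-string f'        "{field_name}": "<your analysis for {point}>"' (built on char lists)
def pvLine (field_name point : String) : String :=
  String.ofList ("        \"".toList ++ field_name.toList ++ "\": \"<your analysis for ".toList
    ++ point.toList ++ ">\"".toList)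

def generate_json_structure_py (analysis_points : List String) : String :=
  PySem.Str.join ",\n"
    (analysis_points.foldl (fun acc point => acc ++ [pvLine (pvAField point) point]) [])

-- ===== PORT B =====
def pvDelims : List Char := [' ', '-', '(', ')', '/', ',', '#', '.']

-- Python's 'buf and buf[-1] == "_"' on the list buf is exactly buf.getLast? = some '_'
def pvBField (point : String) : String :=
  let buf := (PySem.Str.lower point).toList.foldl
    (fun buf ch =>
      let c := if ch ∈ pvDelims then '_' else ch
      if c = '_' ∧ buf.getLast? = some '_' then buf else buf ++ [c]) []
  PySem.Str.stripChars (String.ofList buf) "_"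

def generate_json_structure_py_alt (analysis_points : List String) : String :=
  PySem.Str.join ",\n"
    (analysis_points.foldl (fun acc point => acc ++ [pvLine (pvBField point) point]) [])

-- ===== PRECONDITION & SPEC =====
def Spec_generate_json_structure_py (analysis_points : List String) (out : String) : Prop := out = generate_json_structure_py_alt analysis_points
instance (analysis_points : List String) (out : String) : Decidable (Spec_generate_json_structure_py analysis_points out) := by unfold Spec_generate_json_structure_py; infer_instance

-- ===== CLAIM (what is proved, stated in full; the proofs are below) =====
def Claim_equal_generate_json_structure_py : Prop := ∀ (analysis_points : List String), Dom_generate_json_structure_py analysis_points → Spec_generate_json_structure_py analysis_points (generate_json_structure_py analysis_points)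

-- ===== LEMMAS AND PROOFS =====

-- the per-character map B applies
def pvG (c : Char) : Char := if c ∈ pvDelims then '_' else c

-- one non-overlapping left-to-right pass of .replace("__", "_")
def pvRepl : List Char → List Char
  | '_' :: '_' :: t => '_' :: pvRepl t
  | c :: t => c :: pvRepl t
  | [] => []

-- "does '__' occur as a substring"
def pvHasDD : List Char → Bool
  | c :: t => (c = '_' && t.head? == some '_') || pvHasDD t
  | [] => false

-- collapse runs of '_' (flag: the previously emitted char was '_')
def pvSqz : Bool → List Char → List Char
  | _, [] => []
  | b, c :: t => if c = '_' ∧ b = true then pvSqz b t else c :: pvSqz (c == '_') t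

lemma pv_go_single (a b : Char) : ∀ (fuel : Nat) (l acc : List Char), l.length ≤ fuel →
    PySem.Chars.replace.go [a] [b] fuel l acc
      = acc.reverse ++ l.map (fun c => if c = a then b else c) := by
  intro fuel
  induction fuel with
  | zero =>
    intro l acc h
    have : l = [] := List.eq_nil_of_length_eq_zero (Nat.le_zero.mp h)
    subst this; simp [PySem.Chars.replace.go]
  | succ n ih =>
    intro l acc h
    cases l with
    | nil => simp [PySem.Chars.replace.go]
    | cons c t =>
      simp only [PySem.Chars.replace.go, List.isPrefixOf, Bool.and_true, List.length_nil,
        List.length_cons, Nat.zero_add, List.drop_succ_cons, List.drop_zero, List.map_cons]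
      by_cases hc : c = a
      · subst hc
        simp only [beq_self_eq_true]
        rw [ih t _ (by simpa using h)]
        simp
      · rw [if_neg (by simp [Ne.symm hc]), ih t _ (by simpa using h)]
        simp [hc]

lemma pv_replace_single (l : List Char) (a b : Char) :
    PySem.Chars.replace l [a] [b] = l.map (fun c => if c = a then b else c) := by
  simp [PySem.Chars.replace, pv_go_single a b l.length l [] le_rfl]

lemma pv_go_dd : ∀ (fuel : Nat) (l acc : List Char), l.length ≤ fuel →
    PySem.Chars.replace.go ['_', '_'] ['_'] fuel l acc = acc.reverse ++ pvRepl l := by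
  intro fuel
  induction fuel with
  | zero =>
    intro l acc h
    have : l = [] := List.eq_nil_of_length_eq_zero (Nat.le_zero.mp h)
    subst this; simp [PySem.Chars.replace.go, pvRepl]
  | succ n ih =>
    intro l acc h
    cases l with
    | nil => simp [PySem.Chars.replace.go, pvRepl]
    | cons c t =>
      cases t with
      | nil =>
        have hpre : ['_', '_'].isPrefixOf [c] = false := by simp [List.isPrefixOf]
        simp only [PySem.Chars.replace.go, hpre, Bool.false_eq_true, if_false]
        rw [ih [] _ (by simp)]
        rw [pvRepl.eq_2 c [] (by intro t1 _ ht; cases ht)]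
        simp [pvRepl]
      | cons d u =>
        by_cases hdd : c = '_' ∧ d = '_'
        · obtain ⟨rfl, rfl⟩ := hdd
          simp only [PySem.Chars.replace.go, List.isPrefixOf, beq_self_eq_true, Bool.and_self,
            if_true, List.length_cons, List.length_nil, Nat.zero_add,
            List.drop_succ_cons, List.drop_zero]
          rw [ih u _ (by simp at h; omega)]
          simp [pvRepl]
        · have hpre : ['_', '_'].isPrefixOf (c :: d :: u) = false := by
            simp only [List.isPrefixOf, Bool.and_true, Bool.and_eq_false_iff, beq_eq_false_iff_ne]
            tauto
          simp only [PySem.Chars.replace.go, hpre, Bool.false_eq_true, if_false]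
          rw [ih (d :: u) _ (by simp at h ⊢; omega)]
          rw [pvRepl.eq_2 c (d :: u) (by
            intro t1 hc ht
            exact hdd ⟨hc, (List.cons.injEq _ _ _ _ ▸ ht).1⟩)]
          simp

lemma pv_replace_dd (l : List Char) :
    PySem.Chars.replace l ['_', '_'] ['_'] = pvRepl l := by
  simp [PySem.Chars.replace, pv_go_dd l.length l [] le_rfl]

lemma pv_isIn_dd (l : List Char) : PySem.Chars.isIn ['_', '_'] l = pvHasDD l := by
  rw [Bool.eq_iff_iff, PySem.Chars.isIn_iff_infix]
  induction l with
  | nil => simp [pvHasDD]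
  | cons c t ih =>
    rw [List.infix_cons_iff]
    constructor
    · rintro (hp | hi)
      · rw [List.cons_prefix_cons] at hp
        obtain ⟨rfl, hp⟩ := hp
        cases t with
        | nil => simp at hp
        | cons d u =>
          rw [List.cons_prefix_cons] at hp
          obtain ⟨rfl, -⟩ := hp
          simp [pvHasDD]
      · simp [pvHasDD, ih.mp hi]
    · intro h
      simp only [pvHasDD, Bool.or_eq_true, Bool.and_eq_true, decide_eq_true_eq, beq_iff_eq] at h
      rcases h with ⟨rfl, hh⟩ | h
      · left
        cases t with
        | nil => simp at hh
        | cons d u =>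
          simp at hh
          subst hh
          simp [List.cons_prefix_cons]
      · right; exact ih.mpr h

lemma pv_sqz_id : ∀ (l : List Char) (b : Bool), pvHasDD l = false →
    (b = true → l.head? ≠ some '_') → pvSqz b l = l := by
  intro l
  induction l with
  | nil => intro b _ _; rfl
  | cons c t ih =>
    intro b hdd hb
    simp only [pvHasDD, Bool.or_eq_false_iff, Bool.and_eq_false_iff] at hdd
    obtain ⟨h1, h2⟩ := hdd
    have hnot : ¬(c = '_' ∧ b = true) := by
      rintro ⟨rfl, rfl⟩
      exact hb rfl (by simp)
    rw [pvSqz, if_neg hnot]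
    rw [ih (c == '_') h2 (by
      intro hc hh
      rcases h1 with h1 | h1
      · simp_all
      · simp_all)]

lemma pv_sqz_dd_cons (t : List Char) : pvSqz true ('_' :: t) = pvSqz true t := by
  rw [pvSqz, if_pos ⟨rfl, rfl⟩]

lemma pv_sqz_repl : ∀ (l : List Char) (b : Bool), pvSqz b (pvRepl l) = pvSqz b l := by
  intro l
  induction l using pvRepl.induct with
  | case1 t ih =>
    intro b
    cases b with
    | true =>
      rw [pvRepl, pv_sqz_dd_cons, pv_sqz_dd_cons, pv_sqz_dd_cons, ih]
    | false =>
      rw [pvRepl]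
      rw [show pvSqz false ('_' :: pvRepl t) = '_' :: pvSqz ('_' == '_') (pvRepl t) from
        by rw [pvSqz, if_neg (by simp)]]
      rw [show pvSqz false ('_' :: '_' :: t) = '_' :: pvSqz ('_' == '_') ('_' :: t) from
        by rw [pvSqz, if_neg (by simp)]]
      simp only [beq_self_eq_true]
      rw [pv_sqz_dd_cons, ih]
  | case2 c t h ih =>
    intro b
    rw [pvRepl.eq_2 c t h]
    by_cases hc : c = '_' ∧ b = true
    · rw [pvSqz, if_pos hc, pvSqz, if_pos hc, ih]
    · rw [pvSqz, if_neg hc, pvSqz, if_neg hc, ih]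
  | case3 => intro b; rfl

lemma pv_repl_le : ∀ (l : List Char), (pvRepl l).length ≤ l.length := by
  intro l
  induction l using pvRepl.induct with
  | case1 t ih => rw [pvRepl]; simp only [List.length_cons]; omega
  | case2 c t h ih => rw [pvRepl.eq_2 c t h]; simp only [List.length_cons]; omega
  | case3 => simp [pvRepl]

lemma pv_repl_len : ∀ (l : List Char), pvHasDD l = true → (pvRepl l).length < l.length := by
  intro l
  induction l using pvRepl.induct with
  | case1 t ih =>
    intro _
    rw [pvRepl]
    have := pv_repl_le t
    simp only [List.length_cons]; omega
  | case2 c t h ih =>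
    intro hdd
    rw [pvRepl.eq_2 c t h]
    simp only [pvHasDD, Bool.or_eq_true, Bool.and_eq_true, decide_eq_true_eq, beq_iff_eq] at hdd
    rcases hdd with ⟨rfl, hh⟩ | hdd
    · exfalso
      cases t with
      | nil => simp at hh
      | cons d u => simp at hh; exact h u rfl (by rw [hh])
    · have := ih hdd
      simp only [List.length_cons]; omega
  | case3 => intro h; simp [pvHasDD] at h

lemma pv_while_toList : ∀ (fuel : Nat) (s : String), s.toList.length ≤ fuel →
    (pvAWhile fuel s).toList = pvSqz false s.toList := by
  intro fuel
  induction fuel with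
  | zero =>
    intro s h
    have : s.toList = [] := List.eq_nil_of_length_eq_zero (Nat.le_zero.mp h)
    rw [pvAWhile, this]; rfl
  | succ n ih =>
    intro s h
    rw [pvAWhile]
    have hin : PySem.Str.isIn "__" s = pvHasDD s.toList := by
      rw [PySem.Str.isIn_eq]
      exact pv_isIn_dd s.toList
    by_cases hd : pvHasDD s.toList = true
    · rw [if_pos (by rw [hin]; exact hd)]
      have hrt : (PySem.Str.replace s "__" "_").toList = pvRepl s.toList := by
        rw [PySem.Str.toList_replace]
        exact pv_replace_dd s.toList
      rw [ih _ (by rw [hrt]; have := pv_repl_len s.toList hd; omega)]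
      rw [hrt, pv_sqz_repl]
    · rw [if_neg (by rw [hin]; simpa using hd)]
      exact (pv_sqz_id s.toList false (by simpa using hd) (by intro h; cases h)).symm

lemma pv_bfold : ∀ (l buf : List Char),
    l.foldl (fun buf ch =>
      let c := if ch ∈ pvDelims then '_' else ch
      if c = '_' ∧ buf.getLast? = some '_' then buf else buf ++ [c]) buf
    = buf ++ pvSqz (buf.getLast? == some '_') (l.map pvG) := by
  intro l
  induction l with
  | nil => intro buf; simp [pvSqz]
  | cons ch t ih =>
    intro buf
    rw [List.foldl_cons, List.map_cons]
    have hg : (if ch ∈ pvDelims then '_' else ch) = pvG ch := rfl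
    by_cases hc : pvG ch = '_' ∧ buf.getLast? = some '_'
    · simp only [hg, if_pos hc]
      rw [ih buf]
      rw [show pvSqz (buf.getLast? == some '_') (pvG ch :: t.map pvG)
            = pvSqz (buf.getLast? == some '_') (t.map pvG) from by
        rw [pvSqz, if_pos ⟨hc.1, by rw [hc.2]; rfl⟩]]
    · simp only [hg, if_neg hc]
      rw [ih (buf ++ [pvG ch])]
      rw [show pvSqz (buf.getLast? == some '_') (pvG ch :: t.map pvG)
            = pvG ch :: pvSqz (pvG ch == '_') (t.map pvG) from by
        rw [pvSqz, if_neg (by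
          rintro ⟨h1, h2⟩
          exact hc ⟨h1, by simpa using h2⟩)]]
      simp [List.getLast?_append]

lemma pv_map_chain_aux (c : Char) :
    ((fun c => if c = '.' then '_' else c) ((fun c => if c = '#' then '_' else c) ((fun c => if c = ',' then '_' else c) ((fun c => if c = '/' then '_' else c) ((fun c => if c = ')' then '_' else c) ((fun c => if c = '(' then '_' else c) ((fun c => if c = '-' then '_' else c) ((fun c => if c = ' ' then '_' else c) c)))))))) = pvG c := by
  by_cases hc : c ∈ pvDelims
  · simp only [pvDelims, List.mem_cons, List.not_mem_nil, or_false] at hc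
    rcases hc with rfl | rfl | rfl | rfl | rfl | rfl | rfl | rfl <;> rfl
  · have h := hc
    simp only [pvDelims, List.mem_cons, List.not_mem_nil, or_false, not_or] at h
    obtain ⟨h1, h2, h3, h4, h5, h6, h7, h8⟩ := h
    simp [pvG, h1, h2, h3, h4, h5, h6, h7, h8, hc]

lemma pv_chain_toList (point : String) :
    ((PySem.Str.replace (PySem.Str.replace (PySem.Str.replace (PySem.Str.replace (PySem.Str.replace (PySem.Str.replace (PySem.Str.replace (PySem.Str.replace (PySem.Str.lower point) " " "_") "-" "_") "(" "_") ")" "_") "/" "_") "," "_") "#" "_") "." "_")).toList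
    = (PySem.Chars.lower point.toList).map pvG := by
  have h1 : ((PySem.Str.replace (PySem.Str.lower point) " " "_")).toList = (((PySem.Chars.lower point.toList)).map (fun c => if c = ' ' then '_' else c)) := by
    rw [PySem.Str.toList_replace, PySem.Str.toList_lower]
    exact pv_replace_single _ ' ' '_'
  have h2 : ((PySem.Str.replace (PySem.Str.replace (PySem.Str.lower point) " " "_") "-" "_")).toList = (((((PySem.Chars.lower point.toList)).map (fun c => if c = ' ' then '_' else c))).map (fun c => if c = '-' then '_' else c)) := by
    rw [PySem.Str.toList_replace, h1]
    exact pv_replace_single _ '-' '_'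
  have h3 : ((PySem.Str.replace (PySem.Str.replace (PySem.Str.replace (PySem.Str.lower point) " " "_") "-" "_") "(" "_")).toList = (((((((PySem.Chars.lower point.toList)).map (fun c => if c = ' ' then '_' else c))).map (fun c => if c = '-' then '_' else c))).map (fun c => if c = '(' then '_' else c)) := by
    rw [PySem.Str.toList_replace, h2]
    exact pv_replace_single _ '(' '_'
  have h4 : ((PySem.Str.replace (PySem.Str.replace (PySem.Str.replace (PySem.Str.replace (PySem.Str.lower point) " " "_") "-" "_") "(" "_") ")" "_")).toList = (((((((((PySem.Chars.lower point.toList)).map (fun c => if c = ' ' then '_' else c))).map (fun c => if c = '-' then '_' else c))).map (fun c => if c = '(' then '_' else c))).map (fun c => if c = ')' then '_' else c)) := by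
    rw [PySem.Str.toList_replace, h3]
    exact pv_replace_single _ ')' '_'
  have h5 : ((PySem.Str.replace (PySem.Str.replace (PySem.Str.replace (PySem.Str.replace (PySem.Str.replace (PySem.Str.lower point) " " "_") "-" "_") "(" "_") ")" "_") "/" "_")).toList = (((((((((((PySem.Chars.lower point.toList)).map (fun c => if c = ' ' then '_' else c))).map (fun c => if c = '-' then '_' else c))).map (fun c => if c = '(' then '_' else c))).map (fun c => if c = ')' then '_' else c))).map (fun c => if c = '/' then '_' else c)) := by
    rw [PySem.Str.toList_replace, h4]
    exact pv_replace_single _ '/' '_'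
  have h6 : ((PySem.Str.replace (PySem.Str.replace (PySem.Str.replace (PySem.Str.replace (PySem.Str.replace (PySem.Str.replace (PySem.Str.lower point) " " "_") "-" "_") "(" "_") ")" "_") "/" "_") "," "_")).toList = (((((((((((((PySem.Chars.lower point.toList)).map (fun c => if c = ' ' then '_' else c))).map (fun c => if c = '-' then '_' else c))).map (fun c => if c = '(' then '_' else c))).map (fun c => if c = ')' then '_' else c))).map (fun c => if c = '/' then '_' else c))).map (fun c => if c = ',' then '_' else c)) := by
    rw [PySem.Str.toList_replace, h5]
    exact pv_replace_single _ ',' '_'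
  have h7 : ((PySem.Str.replace (PySem.Str.replace (PySem.Str.replace (PySem.Str.replace (PySem.Str.replace (PySem.Str.replace (PySem.Str.replace (PySem.Str.lower point) " " "_") "-" "_") "(" "_") ")" "_") "/" "_") "," "_") "#" "_")).toList = (((((((((((((((PySem.Chars.lower point.toList)).map (fun c => if c = ' ' then '_' else c))).map (fun c => if c = '-' then '_' else c))).map (fun c => if c = '(' then '_' else c))).map (fun c => if c = ')' then '_' else c))).map (fun c => if c = '/' then '_' else c))).map (fun c => if c = ',' then '_' else c))).map (fun c => if c = '#' then '_' else c)) := by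
    rw [PySem.Str.toList_replace, h6]
    exact pv_replace_single _ '#' '_'
  have h8 : ((PySem.Str.replace (PySem.Str.replace (PySem.Str.replace (PySem.Str.replace (PySem.Str.replace (PySem.Str.replace (PySem.Str.replace (PySem.Str.replace (PySem.Str.lower point) " " "_") "-" "_") "(" "_") ")" "_") "/" "_") "," "_") "#" "_") "." "_")).toList = (((((((((((((((((PySem.Chars.lower point.toList)).map (fun c => if c = ' ' then '_' else c))).map (fun c => if c = '-' then '_' else c))).map (fun c => if c = '(' then '_' else c))).map (fun c => if c = ')' then '_' else c))).map (fun c => if c = '/' then '_' else c))).map (fun c => if c = ',' then '_' else c))).map (fun c => if c = '#' then '_' else c))).map (fun c => if c = '.' then '_' else c)) := by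
    rw [PySem.Str.toList_replace, h7]
    exact pv_replace_single _ '.' '_'
  rw [h8]
  clear h1 h2 h3 h4 h5 h6 h7 h8
  generalize PySem.Chars.lower point.toList = l
  induction l with
  | nil => rfl
  | cons c t ih => simp only [List.map_cons, ih, pv_map_chain_aux]

lemma pv_field_eq (point : String) : pvAField point = pvBField point := by
  show PySem.Str.stripChars
      (pvAWhile
        (PySem.Str.replace (PySem.Str.replace (PySem.Str.replace (PySem.Str.replace
          (PySem.Str.replace (PySem.Str.replace (PySem.Str.replace (PySem.Str.replace
            (PySem.Str.lower point) " " "_") "-" "_") "(" "_") ")" "_") "/" "_") "," "_")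
            "#" "_") "." "_").toList.length
        (PySem.Str.replace (PySem.Str.replace (PySem.Str.replace (PySem.Str.replace
          (PySem.Str.replace (PySem.Str.replace (PySem.Str.replace (PySem.Str.replace
            (PySem.Str.lower point) " " "_") "-" "_") "(" "_") ")" "_") "/" "_") "," "_")
            "#" "_") "." "_")) "_"
    = PySem.Str.stripChars
        (String.ofList ((PySem.Str.lower point).toList.foldl
          (fun buf ch =>
            let c := if ch ∈ pvDelims then '_' else ch
            if c = '_' ∧ buf.getLast? = some '_' then buf else buf ++ [c]) [])) "_"
  rw [pv_bfold]
  simp only [List.nil_append, List.getLast?_nil,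
    show ((none : Option Char) == some '_') = false from rfl]
  rw [← String.toList_inj]
  simp only [PySem.Str.toList_stripChars, String.toList_ofList]
  rw [pv_while_toList _ _ le_rfl, pv_chain_toList, PySem.Str.toList_lower]

-- ===== VERDICT (by name: the statement is the Claim_ definition above) =====
theorem generate_json_structure_py_spec : Claim_equal_generate_json_structure_py := by
  intro pts _
  unfold Spec_generate_json_structure_py generate_json_structure_py generate_json_structure_py_alt
  rw [PySem.List.foldl_append_singleton_eq_map, PySem.List.foldl_append_singleton_eq_map]
  refine congrArg (PySem.Str.join ",\n") ?_
  simp only [List.nil_append]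
  exact List.map_congr_left (fun p _ => by rw [pv_field_eq])
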